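-- pv_equiv track=rewrite | github.com/luminaa/codesignal_arcade | Intro/Edge of the Ocean/MatrixElementsSum.py | solution
-- ===== SOURCE A (Python) =====
-- def solution(matrix):
--     count = 0
--     for i in range(len(matrix)):
--         for j in range(len(matrix[0])):
--             if matrix[i][j] == 0:
--                 continue
--             flag = True
--             for k in range(i):
--                 if matrix[k][j] == 0:
--                     flag = False
--                     break
--             if flag:
--                 count += matrix[i][j]
--     return count
-- ===== SOURCE B (Python) =====
-- def solution(matrix):
--     total = 0
--     width = len(matrix[0]) if matrix else 0
--     blocked = [False] * width
--     for row in matrix: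
--         for j in range(width):
--             v = row[j]
--             if blocked[j]:
--                 continue
--             if v == 0:
--                 blocked[j] = True
--             else:
--                 total += v
--     return total
-- ===== Notes on version B (the rewrite author's own statement) =====
-- stated objective: faster
-- what changed: B makes a single pass over the rows maintaining a boolean 'blocked' array of columns that have seen a zero, instead of A's per-cell rescan of the whole column above.
import Mathlib
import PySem

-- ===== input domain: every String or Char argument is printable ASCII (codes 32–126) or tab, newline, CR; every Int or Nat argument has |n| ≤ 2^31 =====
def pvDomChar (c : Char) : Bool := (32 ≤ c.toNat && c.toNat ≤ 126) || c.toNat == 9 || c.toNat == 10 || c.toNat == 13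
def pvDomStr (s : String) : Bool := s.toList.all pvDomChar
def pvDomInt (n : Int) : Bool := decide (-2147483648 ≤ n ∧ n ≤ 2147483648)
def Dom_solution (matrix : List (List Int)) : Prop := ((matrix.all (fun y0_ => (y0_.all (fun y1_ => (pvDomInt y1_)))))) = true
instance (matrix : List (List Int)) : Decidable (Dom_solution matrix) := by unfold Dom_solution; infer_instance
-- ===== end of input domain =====

-- B makes a single pass over the rows with a boolean array of columns already blocked by a zero, instead of A's per-cell rescan of the whole column above (faster).

-- ===== PORT A =====
def solution (matrix : List (List Int)) : Int :=
  (PySem.List.pyRange 0 (matrix.length : Int) 1).foldl (fun count i =>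
    (PySem.List.pyRange 0 ((PySem.List.pyGetD matrix 0 []).length : Int) 1).foldl (fun count j =>
      if PySem.List.pyGetD (PySem.List.pyGetD matrix i []) j 0 == 0 then count
      else
        let flag := (PySem.List.pyRange 0 i 1).foldl (fun flag k =>
          if flag then
            if PySem.List.pyGetD (PySem.List.pyGetD matrix k []) j 0 == 0 then false else flag
          else flag) true
        if flag then count + PySem.List.pyGetD (PySem.List.pyGetD matrix i []) j 0 else count
      ) count) 0

-- ===== PORT B =====
-- inner loop: `for j in range(width): v = row[j]; …` updating (total, blocked)
def rowStep (width : Nat) (row : List Int) (st : Int × List Bool) : Int × List Bool :=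
  (List.range width).foldl (fun st j =>
    let v := row.getD j 0
    if st.2.getD j false then st
    else if v = 0 then (st.1, st.2.set j true)
    else (st.1 + v, st.2)) st

def solution_alt (matrix : List (List Int)) : Int :=
  let width := (matrix.headD []).length
  (matrix.foldl (fun st row => rowStep width row st) (0, List.replicate width false)).1

-- ===== PRECONDITION & SPEC =====
-- Pre_ excludes ragged matrices where some row is shorter than the first row: there both Pythons raise IndexError.
def Pre_solution (matrix : List (List Int)) : Prop :=
  ∀ row ∈ matrix, (matrix.headD []).length ≤ row.length
instance (matrix : List (List Int)) : Decidable (Pre_solution matrix) := by unfold Pre_solution; infer_instance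

def pvWitness_solution : List (List Int) := [[1, 2], [0, 3]]

def Spec_solution (matrix : List (List Int)) (out : Int) : Prop := out = solution_alt matrix
instance (matrix : List (List Int)) (out : Int) : Decidable (Spec_solution matrix out) := by unfold Spec_solution; infer_instance

-- ===== CLAIM (what is proved, stated in full; the proofs are below) =====
def Claim_equal_solution : Prop := ∀ (matrix : List (List Int)), Dom_solution matrix → Pre_solution matrix → Spec_solution matrix (solution matrix)

-- ===== LEMMAS AND PROOFS =====

-- entry (i, j) as A reads it
def ent (m : List (List Int)) (i j : Nat) : Int := (m.getD i []).getD j 0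
-- "no zero strictly above row i in column j"
def colPref (m : List (List Int)) (j i : Nat) : Bool := (List.range i).all (fun k => ent m k j != 0)
-- contribution of cell (i, j) to A's count
def term (m : List (List Int)) (i j : Nat) : Int :=
  if ent m i j = 0 then 0 else if colPref m j i then ent m i j else 0
-- column j of m
def colA (m : List (List Int)) (j : Nat) : List Int := m.map (fun r => r.getD j 0)
-- B's per-column meaning: sum until the first zero
def sumUntilZero : List Int → Int → Int
  | [], total => total
  | v :: vs, total => if v == 0 then total else sumUntilZero vs (total + v)

theorem beq_decide (a : Int) : (a == 0) = decide (a = 0) := by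
  cases h : a == 0 <;> simp_all

theorem colA_getD (m : List (List Int)) (j i : Nat) (hi : i < m.length) :
    (colA m j).getD i 0 = ent m i j := by
  unfold colA ent
  rw [List.getD_eq_getElem _ _ (by simpa using hi), List.getD_eq_getElem _ _ hi]
  simp

theorem all_congr {α : Type} (l : List α) (p q : α → Bool) (h : ∀ x ∈ l, p x = q x) :
    l.all p = l.all q := by
  induction l with
  | nil => rfl
  | cons x xs ih => simp_all

theorem sum_range_list (n : Nat) (f : Nat → Int) :
    ((List.range n).map f).sum = ∑ i ∈ Finset.range n, f i := by
  induction n with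
  | zero => simp
  | succ k ih => simp [List.range_succ, Finset.sum_range_succ, ih]

theorem sumUntilZero_shift (c : List Int) (t : Int) : sumUntilZero c t = t + sumUntilZero c 0 := by
  induction c generalizing t with
  | nil => simp [sumUntilZero]
  | cons v vs ih =>
    by_cases h : v = 0 <;> simp [sumUntilZero, h]
    rw [ih (t + v), ih v]; ring

-- A's inner `for k in range(i)` flag loop decides "no zero above"
theorem flag_fold (m : List (List Int)) (j i : Nat) :
    List.foldl (fun (x : Bool) (k : Nat) =>
      if x = true then
        if (PySem.List.pyGetD (PySem.List.pyGetD m (k : Int) []) ((j : Nat) : Int) 0 == 0) = true then false else x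
      else x) true (List.range i) = colPref m j i := by
  induction i with
  | zero => simp [colPref]
  | succ n ih =>
    rw [List.range_succ, List.foldl_append, ih]
    simp only [List.foldl_cons, List.foldl_nil, colPref, List.range_succ, List.all_append,
      List.all_cons, List.all_nil, PySem.List.pyGetD_natCast]
    cases hc : (List.range n).all (fun k => ent m k j != 0) <;>
      simp [ent, bne, beq_decide]

theorem A_eq_sum (m : List (List Int)) :
    solution m = ((List.range m.length).map (fun i =>
      ((List.range (m.headD []).length).map (fun j => term m i j)).sum)).sum := by
  unfold solution
  have hhead : PySem.List.pyGetD m 0 [] = m.headD [] := by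
    cases m <;> simp [PySem.List.pyGetD, PySem.List.pyGet?, PySem.List.pyIdx?]
  rw [hhead]
  simp only [PySem.List.pyRange_zero_natCast, List.foldl_map]
  have hout : (fun (x : Int) (y : Nat) =>
      List.foldl (fun (x : Int) (y_1 : Nat) =>
        if (PySem.List.pyGetD (PySem.List.pyGetD m (y : Int) []) ((y_1 : Nat) : Int) 0 == 0) = true then x
        else
          if List.foldl (fun (x : Bool) (y : Nat) =>
                if x = true then
                  if (PySem.List.pyGetD (PySem.List.pyGetD m (y : Int) []) ((y_1 : Nat) : Int) 0 == 0) = true then false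
                  else x
                else x) true (List.range y) = true then
            x + PySem.List.pyGetD (PySem.List.pyGetD m (y : Int) []) ((y_1 : Nat) : Int) 0
          else x) x (List.range (m.headD []).length))
      = fun (x : Int) (y : Nat) => x + ((List.range (m.headD []).length).map (fun j => term m y j)).sum := by
    funext x y
    have hb : (fun (x : Int) (y_1 : Nat) =>
        if (PySem.List.pyGetD (PySem.List.pyGetD m (y : Int) []) ((y_1 : Nat) : Int) 0 == 0) = true then x
        else
          if List.foldl (fun (x : Bool) (y : Nat) =>
                if x = true then
                  if (PySem.List.pyGetD (PySem.List.pyGetD m (y : Int) []) ((y_1 : Nat) : Int) 0 == 0) = true then false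
                  else x
                else x) true (List.range y) = true then
            x + PySem.List.pyGetD (PySem.List.pyGetD m (y : Int) []) ((y_1 : Nat) : Int) 0
          else x)
        = fun (x : Int) (j : Nat) => x + term m y j := by
      funext x j
      rw [flag_fold m j y]
      simp only [PySem.List.pyGetD_natCast, term, ent, beq_decide]
      split_ifs <;> simp_all
    rw [hb, PySem.List.foldl_add]
  rw [hout, PySem.List.foldl_add]
  simp

-- getD through set at a different / same index
theorem getD_set_ne (l : List Bool) (i j : Nat) (a : Bool) (h : i ≠ j) :
    (l.set i a).getD j false = l.getD j false := by
  simp [List.getD_eq_getElem?_getD, List.getElem?_set_ne h]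

theorem getD_set_self (l : List Bool) (i : Nat) (a : Bool) (h : i < l.length) :
    (l.set i a).getD i false = a := by
  simp [List.getD_eq_getElem?_getD, List.getElem?_set_self h]

-- the inner fold of rowStep preserves the blocked array's length
theorem rowStep_len (w : Nat) (row : List Int) (st : Int × List Bool) :
    (rowStep w row st).2.length = st.2.length := by
  unfold rowStep
  induction w generalizing st with
  | zero => simp
  | succ n ih =>
    rw [List.range_succ, List.foldl_append]
    simp only [List.foldl_cons, List.foldl_nil]
    set st' := List.foldl _ st (List.range n) with hst'
    have hlen : st'.2.length = st.2.length := ih st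
    split_ifs <;> simp [hlen]

-- rowStep's blocked array after the pass
theorem rowStep_blocked (w : Nat) (row : List Int) (st : Int × List Bool) (j : Nat) :
    (rowStep w row st).2.getD j false =
      (if j < w ∧ j < st.2.length then st.2.getD j false || decide (row.getD j 0 = 0)
       else st.2.getD j false) := by
  unfold rowStep
  induction w generalizing st j with
  | zero => simp
  | succ n ih =>
    rw [List.range_succ, List.foldl_append]
    simp only [List.foldl_cons, List.foldl_nil]
    set st' := List.foldl (fun st j =>
      let v := row.getD j 0
      if st.2.getD j false then st
      else if v = 0 then (st.1, st.2.set j true)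
      else (st.1 + v, st.2)) st (List.range n) with hst'
    have hR : st' = rowStep n row st := by rw [hst']; rfl
    have hlen : st'.2.length = st.2.length := by rw [hR, rowStep_len]
    have hgen : ∀ k, st'.2.getD k false =
        (if k < n ∧ k < st.2.length then st.2.getD k false || decide (row.getD k 0 = 0)
         else st.2.getD k false) := by
      intro k; rw [hst']; exact ih st k
    have hn : st'.2.getD n false = st.2.getD n false := by rw [hgen n]; simp
    by_cases hb : st'.2.getD n false
    · rw [if_pos hb, hgen j]
      rw [hn] at hb
      by_cases hjn : j = n
      · subst hjn
        rw [if_neg (by omega : ¬(j < j ∧ j < st.2.length))]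
        split_ifs <;> simp_all
      · have h1 : (j < n ∧ j < st.2.length) ↔ (j < n + 1 ∧ j < st.2.length) := by omega
        simp only [h1]
    · rw [if_neg hb]
      by_cases hv : row.getD n 0 = 0
      · rw [if_pos hv]
        simp only
        by_cases hjn : j = n
        · subst hjn
          rw [hn] at hb
          by_cases hl : j < st.2.length
          · rw [getD_set_self _ _ _ (hlen ▸ hl)]
            simp_all
          · rw [List.set_eq_of_length_le (by omega), hgen j]
            simp [hl]
        · rw [getD_set_ne _ _ _ _ (fun h => hjn h.symm), hgen j]
          have h1 : (j < n ∧ j < st.2.length) ↔ (j < n + 1 ∧ j < st.2.length) := by omega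
          simp only [h1]
      · rw [if_neg hv]
        simp only
        rw [hgen j]
        by_cases hjn : j = n
        · subst hjn
          rw [hn] at hb
          simp_all [Nat.lt_irrefl]
        · have h1 : (j < n ∧ j < st.2.length) ↔ (j < n + 1 ∧ j < st.2.length) := by omega
          simp only [h1]

-- rowStep's total after the pass
theorem rowStep_fst (w : Nat) (row : List Int) (st : Int × List Bool) (hw : w ≤ st.2.length) :
    (rowStep w row st).1 = st.1 + ∑ j ∈ Finset.range w,
      (if st.2.getD j false then 0 else if row.getD j 0 = 0 then 0 else row.getD j 0) := by
  unfold rowStep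
  induction w generalizing st with
  | zero => simp
  | succ n ih =>
    rw [List.range_succ, List.foldl_append]
    simp only [List.foldl_cons, List.foldl_nil]
    set st' := List.foldl (fun st j =>
      let v := row.getD j 0
      if st.2.getD j false then st
      else if v = 0 then (st.1, st.2.set j true)
      else (st.1 + v, st.2)) st (List.range n) with hst'
    have hR : st' = rowStep n row st := by rw [hst']; rfl
    have hfst : st'.1 = st.1 + ∑ j ∈ Finset.range n,
        (if st.2.getD j false then 0 else if row.getD j 0 = 0 then 0 else row.getD j 0) := by
      rw [hst']; exact ih st (by omega)
    have hn : st'.2.getD n false = st.2.getD n false := by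
      rw [hR, rowStep_blocked n row st n]; simp
    rw [Finset.sum_range_succ, ← add_assoc, ← hfst]
    simp only [hn]
    split_ifs <;> simp_all <;> ring

-- one column's combined contribution of the current row and the remaining rows
theorem per_col (bj : Bool) (v : Int) (c : List Int) :
    ((if bj then 0 else if v = 0 then 0 else v) +
      if (bj || decide (v = 0)) then 0 else sumUntilZero c 0) =
    (if bj then 0 else sumUntilZero (v :: c) 0) := by
  cases bj
  · by_cases hv : v = 0
    · simp [sumUntilZero, hv]
    · simp only [Bool.false_eq_true, if_neg, ite_false, decide_eq_true_eq, hv, Bool.false_or,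
        decide_false, sumUntilZero, beq_decide]
      simp only [hv, decide_false, Bool.false_eq_true, if_false, zero_add]
      rw [sumUntilZero_shift c v]
  · simp

-- the row fold computes the per-column sums-until-zero of the unblocked columns
theorem rows_fold (rs : List (List Int)) (w : Nat) (t : Int) (b : List Bool) (hb : b.length = w) :
    (rs.foldl (fun st row => rowStep w row st) (t, b)).1 =
      t + ∑ j ∈ Finset.range w,
        (if b.getD j false then 0 else sumUntilZero (rs.map (fun r => r.getD j 0)) 0) := by
  induction rs generalizing t b with
  | nil =>
    simp only [List.foldl_nil, List.map_nil]
    rw [Finset.sum_eq_zero (fun j _ => by split_ifs <;> simp [sumUntilZero])]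
    ring
  | cons r rs ih =>
    simp only [List.foldl_cons]
    have hpair : rowStep w r (t, b) = ((rowStep w r (t, b)).1, (rowStep w r (t, b)).2) := rfl
    rw [hpair, ih _ _ (by rw [rowStep_len]; exact hb),
        rowStep_fst w r (t, b) (by simp [hb]), add_assoc, ← Finset.sum_add_distrib]
    congr 1
    apply Finset.sum_congr rfl
    intro j hj
    have hjw : j < w := Finset.mem_range.mp hj
    rw [rowStep_blocked w r (t, b) j,
        if_pos (show j < w ∧ j < (t, b).2.length by refine ⟨hjw, ?_⟩; simpa [hb] using hjw),
        List.map_cons]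
    exact per_col (b.getD j false) (r.getD j 0) (rs.map fun r => r.getD j 0)

theorem B_eq_sum (m : List (List Int)) :
    solution_alt m = ∑ j ∈ Finset.range (m.headD []).length, sumUntilZero (colA m j) 0 := by
  unfold solution_alt
  rw [rows_fold m (m.headD []).length 0 (List.replicate (m.headD []).length false) (by simp)]
  simp [colA, List.getD_replicate]

-- per-column core: A's guarded column sum is the sum-until-first-zero
theorem col_core (c : List Int) :
    ((List.range c.length).map (fun i =>
      if c.getD i 0 = 0 then 0
      else if (List.range i).all (fun k => c.getD k 0 != 0) then c.getD i 0 else 0)).sum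
    = sumUntilZero c 0 := by
  induction c with
  | nil => simp [sumUntilZero]
  | cons v vs ih =>
    rw [List.length_cons, List.range_succ_eq_map, List.map_cons, List.map_map, List.sum_cons]
    by_cases hv : v = 0
    · subst hv
      rw [show sumUntilZero (0 :: vs) 0 = 0 from by simp [sumUntilZero]]
      have hall : ∀ x ∈ (List.range vs.length).map ((fun i =>
          if (0 :: vs).getD i 0 = (0:Int) then 0
          else if (List.range i).all (fun k => (0 :: vs).getD k 0 != 0) then (0 :: vs).getD i 0 else 0) ∘ Nat.succ), x = 0 := by
        intro x hx
        rcases List.mem_map.1 hx with ⟨i, _, rfl⟩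
        simp only [Function.comp, List.getD_cons_succ]
        split_ifs with h1 h2
        · rfl
        · exfalso
          rw [List.all_eq_true] at h2
          have := h2 0 (List.mem_range.2 (Nat.succ_pos i))
          simp at this
        · rfl
      rw [List.sum_eq_zero hall]
      simp
    · have hz : sumUntilZero (v :: vs) 0 = v + sumUntilZero vs 0 := by
        simp [sumUntilZero, hv]; rw [sumUntilZero_shift]
      rw [hz]
      have hmap : (List.range vs.length).map ((fun i =>
          if (v :: vs).getD i 0 = 0 then 0
          else if (List.range i).all (fun k => (v :: vs).getD k 0 != 0) then (v :: vs).getD i 0 else 0) ∘ Nat.succ)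
          = (List.range vs.length).map (fun i =>
          if vs.getD i 0 = 0 then 0
          else if (List.range i).all (fun k => vs.getD k 0 != 0) then vs.getD i 0 else 0) := by
        apply List.map_congr_left
        intro i hi
        simp only [Function.comp, List.getD_cons_succ, List.range_succ_eq_map, List.all_cons,
          List.all_map, List.getD_cons_zero, Function.comp]
        congr 1
        simp [hv]
      rw [hmap, ih]
      simp [hv]

-- ===== VERDICT (by name: the statement is the Claim_ definition above) =====
theorem solution_spec : Claim_equal_solution := by
  intro m _ _
  unfold Spec_solution
  rw [A_eq_sum, B_eq_sum]
  have hcol : ∀ j : Nat, (∑ i ∈ Finset.range m.length, term m i j) = sumUntilZero (colA m j) 0 := by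
    intro j
    rw [← col_core (colA m j)]
    have hlen : (colA m j).length = m.length := by simp [colA]
    rw [hlen, sum_range_list]
    apply Finset.sum_congr rfl
    intro i hi
    rw [Finset.mem_range] at hi
    have hcond : ((List.range i).all fun k => (colA m j).getD k 0 != 0)
        = ((List.range i).all fun k => ent m k j != 0) := by
      apply all_congr
      intro k hk
      rw [colA_getD m j k (lt_trans (List.mem_range.1 hk) hi)]
    rw [colA_getD m j i hi, hcond]
    rfl
  calc ((List.range m.length).map (fun i =>
          ((List.range (m.headD []).length).map (fun j => term m i j)).sum)).sum
      = ∑ i ∈ Finset.range m.length, ∑ j ∈ Finset.range (m.headD []).length, term m i j := by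
        simp [sum_range_list]
    _ = ∑ j ∈ Finset.range (m.headD []).length, ∑ i ∈ Finset.range m.length, term m i j :=
        Finset.sum_comm
    _ = ∑ j ∈ Finset.range (m.headD []).length, sumUntilZero (colA m j) 0 :=
        Finset.sum_congr rfl (fun j _ => hcol j)
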